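-- pv_equiv track=rewrite | github.com/libou584/Advent-of-Code | 2023/day14/prob2.py | slideDown
-- ===== SOURCE A (Python) =====
-- def slideDown(map) :
--     for i in range(len(map)-2, -1, -1) :
--         for j in range(len(map[0])) :
--             if map[i][j] == 'O' :
--                 i0 = i+1
--                 while i0 < len(map) and map[i0][j] == '.' :
--                     i0 += 1
--                 map[i][j] = '.'
--                 map[i0-1][j] = 'O'
--     return map
-- ===== SOURCE B (Python) =====
-- # Per-column single downward pass with a next-free-row pointer instead of A's per-cell
-- # downward rescans; mutates `map` in place exactly like A and returns it.
-- def slideDown(map):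
--     cols = len(map[0]) if map else 0
--     for j in range(cols):
--         dest = len(map) - 1
--         for i in range(len(map) - 1, -1, -1):
--             c = map[i][j]
--             if c == 'O':
--                 map[i][j] = '.'
--                 map[dest][j] = 'O'
--                 dest -= 1
--             elif c != '.':
--                 dest = i - 1
--     return map
-- ===== Notes on version B (the rewrite author's own statement) =====
-- stated objective: alternative
-- what changed: Replaces A's row-major sweep that rescans downward from every 'O' with a per-column single bottom-up pass that tracks the next free landing row (reset below each blocker); same in-place mutation and return value.
-- outside the precondition, e.g. on slideDown([['.'], []]): A returns [['.'], []], B raises IndexError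
import Mathlib
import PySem

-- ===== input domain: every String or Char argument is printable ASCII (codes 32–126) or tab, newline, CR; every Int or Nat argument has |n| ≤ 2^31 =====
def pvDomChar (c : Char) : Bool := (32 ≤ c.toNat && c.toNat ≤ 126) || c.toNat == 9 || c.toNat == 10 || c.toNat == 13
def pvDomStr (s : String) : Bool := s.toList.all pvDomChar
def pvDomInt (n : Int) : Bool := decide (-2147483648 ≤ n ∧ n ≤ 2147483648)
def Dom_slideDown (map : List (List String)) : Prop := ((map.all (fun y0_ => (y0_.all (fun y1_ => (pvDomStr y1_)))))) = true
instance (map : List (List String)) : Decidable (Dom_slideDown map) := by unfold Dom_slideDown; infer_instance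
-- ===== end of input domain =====

-- B replaces A's per-'O' downward rescans by one bottom-up pass per column with a
-- next-free-row pointer; both mutate the Python argument in place identically, the
-- theorems below are about the returned value.

-- shared grid primitives (cell read / cell write, number of columns = len(map[0]))
def ncols (m : List (List String)) : Nat :=
  match m with
  | [] => 0
  | r :: _ => r.length

def gcell (m : List (List String)) (i j : Nat) : String := (m.getD i []).getD j ""

def gset (m : List (List String)) (i j : Nat) (v : String) : List (List String) :=
  m.set i ((m.getD i []).set j v)

-- ===== PORT A =====
-- the inner `while i0 < len(map) and map[i0][j] == '.'`
def whileA (m : List (List String)) (j : Nat) (i0 : Nat) : Nat :=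
  if h : i0 < m.length ∧ gcell m i0 j = "." then whileA m j (i0 + 1) else i0
termination_by m.length - i0
decreasing_by omega

-- the body of the inner `for j` loop at row i, column j
def rowStepA (m : List (List String)) (i j : Nat) : List (List String) :=
  if gcell m i j = "O" then
    gset (gset m i j ".") (whileA m j (i + 1) - 1) j "O"
  else m

-- the inner `for j in range(len(map[0]))` loop
def innerA (m : List (List String)) (i : Nat) : List (List String) :=
  (List.range (ncols m)).foldl (fun acc j => rowStepA acc i j) m

-- `for i in range(len(map)-2, -1, -1)`
def slideDown (map : List (List String)) : List (List String) :=
  (List.range (map.length - 1)).reverse.foldl innerA map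

-- ===== PORT B =====
-- body of B's inner `for i in range(len(map)-1, -1, -1)` loop; state = (grid, dest)
def colPassStep (j : Nat) (s : List (List String) × Nat) (i : Nat) :
    List (List String) × Nat :=
  let c := gcell s.1 i j
  if c = "O" then (gset (gset s.1 i j ".") s.2 j "O", s.2 - 1)
  else if c ≠ "." then (s.1, i - 1)
  else s

-- one column: single bottom-up pass with the next-free-row pointer `dest`
def colPass (m : List (List String)) (j : Nat) : List (List String) :=
  ((List.range m.length).reverse.foldl (colPassStep j) (m, m.length - 1)).1

def slideDown_alt (map : List (List String)) : List (List String) :=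
  (List.range (ncols map)).foldl colPass map

-- ===== PRECONDITION & SPEC =====
-- Pre_ requires every row to be at least as long as the first row (len(map[0])):
-- on more ragged grids A raises IndexError, except that A happens to return the grid
-- unchanged when its scan order never reaches the short row (an accident of A's
-- row-major scan), while B's column passes read every row and raise there.
def Pre_slideDown (map : List (List String)) : Prop :=
  ∀ r ∈ map, ncols map ≤ r.length

instance (map : List (List String)) : Decidable (Pre_slideDown map) := by
  unfold Pre_slideDown; infer_instance

def pvWitness_slideDown : List (List String) := [["O", "."], [".", "#"], [".", "O"]]

def Spec_slideDown (map : List (List String)) (out : List (List String)) : Prop :=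
  out = slideDown_alt map
instance (map : List (List String)) (out : List (List String)) : Decidable (Spec_slideDown map out) := by
  unfold Spec_slideDown; infer_instance

-- ===== CLAIM (what is proved, stated in full; the proofs are below) =====
def Claim_equal_slideDown : Prop :=
  ∀ (map : List (List String)), Dom_slideDown map → Pre_slideDown map →
    Spec_slideDown map (slideDown map)

-- ===== LEMMAS AND PROOFS =====

-- `j`-th column of the grid, as a list (out-of-range cells read as "")
def colOf (m : List (List String)) (j : Nat) : List String :=
  m.map (fun r => r.getD j "")

-- every row is longer than j (column j really exists in every row)
def WideP (m : List (List String)) (j : Nat) : Prop := ∀ r ∈ m, j < r.length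

-- column-level version of A's step at row i
def scan (c : List String) (k : Nat) : Nat :=
  if h : k < c.length ∧ c.getD k "" = "." then scan c (k + 1) else k
termination_by c.length - k
decreasing_by omega

def gA (c : List String) (i : Nat) : List String :=
  if c.getD i "" = "O" then (c.set i ".").set (scan c (i + 1) - 1) "O" else c

-- column-level version of B's step
def bstep (s : List String × Nat) (i : Nat) : List String × Nat :=
  let x := s.1.getD i ""
  if x = "O" then ((s.1.set i ".").set s.2 "O", s.2 - 1)
  else if x ≠ "." then (s.1, i - 1)
  else s

def slideColB (c : List String) : List String :=
  ((List.range c.length).reverse.foldl bstep (c, c.length - 1)).1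

-- ---- basic list lemmas ----
theorem getD_set (l : List String) (i j : Nat) (a d : String) :
    ((l.set i a).getD j d) = if i = j ∧ i < l.length then a else l.getD j d := by
  rcases Nat.lt_or_ge i l.length with h | h
  · rcases eq_or_ne i j with rfl | hne
    · simp [List.getD_eq_getElem?_getD, h]
    · simp [List.getD_eq_getElem?_getD, hne, h]
  · rw [List.set_eq_of_length_le h]
    simp [Nat.not_lt.2 h]

theorem set_getD_self (l : List String) (i : Nat) : l.set i (l.getD i "") = l := by
  rcases Nat.lt_or_ge i l.length with h | h
  · rw [List.getD_eq_getElem _ _ h, List.set_getElem_self]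
  · exact List.set_eq_of_length_le h

theorem range_reverse_succ (n : Nat) :
    (List.range (n + 1)).reverse = n :: (List.range n).reverse := by
  rw [List.range_succ]; simp

-- ---- colOf / gset lemmas ----
theorem length_colOf (m : List (List String)) (j : Nat) : (colOf m j).length = m.length := by
  simp [colOf]

theorem getD_colOf (m : List (List String)) (i j : Nat) :
    (colOf m j).getD i "" = gcell m i j := by
  rcases Nat.lt_or_ge i m.length with h | h
  · rw [colOf, List.getD_eq_getElem _ _ (by simpa using h), List.getElem_map, gcell,
      List.getD_eq_getElem _ _ h]
  · rw [colOf, List.getD_eq_default _ _ (by simpa using h), gcell,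
      List.getD_eq_default _ _ h]
    simp

theorem rowlens_gset (m : List (List String)) (i j : Nat) (v : String) :
    (gset m i j v).map List.length = m.map List.length := by
  rcases Nat.lt_or_ge i m.length with h | h
  · rw [gset, List.map_set, List.length_set, List.getD_eq_getElem _ _ h]
    have h2 : m[i].length = (m.map List.length)[i]'(by simpa using h) := by simp
    rw [h2, List.set_getElem_self]
  · rw [gset, List.set_eq_of_length_le h]

theorem colOf_gset (m : List (List String)) (i j j' : Nat) (v : String) :
    colOf (gset m i j v) j' = (colOf m j').set i (((m.getD i []).set j v).getD j' "") := by
  simp [colOf, gset, List.map_set]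

theorem colOf_gset_ne (m : List (List String)) (i j j' : Nat) (v : String) (hne : j' ≠ j) :
    colOf (gset m i j v) j' = colOf m j' := by
  rw [colOf_gset, getD_set]
  have hne2 : ¬(j = j' ∧ j < (m.getD i []).length) := by
    rintro ⟨rfl, -⟩; exact hne rfl
  rw [if_neg hne2]
  have h3 : (m.getD i []).getD j' "" = (colOf m j').getD i "" := (getD_colOf m i j').symm
  rw [h3, set_getD_self]

theorem colOf_gset_self (m : List (List String)) (i j : Nat) (v : String) (hw : WideP m j) :
    colOf (gset m i j v) j = (colOf m j).set i v := by
  rw [colOf_gset, getD_set]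
  rcases Nat.lt_or_ge i m.length with h | h
  · have hr : m.getD i [] ∈ m := by
      rw [List.getD_eq_getElem _ _ h]; exact List.getElem_mem h
    rw [if_pos ⟨rfl, hw _ hr⟩]
  · have h1 : (colOf m j).length ≤ i := by rw [length_colOf]; exact h
    rw [List.set_eq_of_length_le h1, List.set_eq_of_length_le h1]

theorem wide_of_rowlens {m m' : List (List String)} {j : Nat}
    (h : m'.map List.length = m.map List.length) (hw : WideP m j) : WideP m' j := by
  intro r hr
  have h1 : r.length ∈ m'.map List.length := List.mem_map_of_mem hr
  rw [h] at h1
  rcases List.mem_map.1 h1 with ⟨r2, hr2, hl2⟩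
  rw [← hl2]; exact hw r2 hr2

theorem ncols_congr {m m' : List (List String)}
    (h : m'.map List.length = m.map List.length) : ncols m' = ncols m := by
  cases m with
  | nil => cases m' with
    | nil => rfl
    | cons r t => simp at h
  | cons r t => cases m' with
    | nil => simp at h
    | cons r2 t2 =>
      simp only [List.map_cons, List.cons.injEq] at h
      simp [ncols, h.1]

-- ---- scan lemmas ----
theorem scan_dot {c : List String} {k : Nat} (h1 : k < c.length) (h2 : c.getD k "" = ".") :
    scan c k = scan c (k + 1) := by
  rw [scan, dif_pos ⟨h1, h2⟩]

theorem scan_block {c : List String} {k : Nat} (h : ¬(k < c.length ∧ c.getD k "" = ".")) :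
    scan c k = k := by
  rw [scan, dif_neg h]

theorem scan_ge (c : List String) (k : Nat) : k ≤ scan c k := by
  fun_induction scan c k with
  | case1 k h ih => omega
  | case2 k h => exact Nat.le_refl _

theorem scan_le (c : List String) (k : Nat) (h : k ≤ c.length) : scan c k ≤ c.length := by
  fun_induction scan c k with
  | case1 k h ih => exact ih (by omega)
  | case2 k h => exact h

theorem scan_dots (c : List String) (k : Nat) :
    ∀ i, k ≤ i → i < scan c k → c.getD i "" = "." := by
  fun_induction scan c k with
  | case1 k h ih =>
    intro i hki hlt
    rcases Nat.eq_or_lt_of_le hki with rfl | hlt2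
    · exact h.2
    · exact ih i hlt2 hlt
  | case2 k h =>
    intro i hki hlt
    omega

theorem scan_eq_of {c : List String} {k d : Nat} (hkd : k ≤ d) (hd : d < c.length)
    (hdots : ∀ i, k ≤ i → i < d → c.getD i "" = ".") (hstop : c.getD d "" ≠ ".") :
    scan c k = d := by
  have key : ∀ n k2, d - k2 = n → k ≤ k2 → k2 ≤ d → scan c k2 = d := by
    intro n
    induction n with
    | zero =>
      intro k2 h0 hk0 hk
      have : k2 = d := by omega
      subst this
      exact scan_block (by rintro ⟨-, h2⟩; exact hstop h2)
    | succ n ih =>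
      intro k2 h0 hk0 hk
      have hkd2 : k2 < d := by omega
      rw [scan_dot (by omega) (hdots k2 hk0 hkd2)]
      exact ih (k2 + 1) (by omega) (by omega) (by omega)
  exact key _ k rfl (Nat.le_refl _) hkd

theorem bstep_eq (c : List String) (d i : Nat) :
    bstep (c, d) i = if c.getD i "" = "O" then ((c.set i ".").set d "O", d - 1)
      else if c.getD i "" ≠ "." then (c, i - 1) else (c, d) := rfl

-- ---- the core single-column equivalence ----
theorem core_col (k : Nat) : ∀ (c : List String) (dest : Nat), k + 1 ≤ c.length →
    scan c (k + 1) = dest + 1 →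
    ((List.range (k + 1)).reverse.foldl bstep (c, dest)).1 =
      (List.range (k + 1)).reverse.foldl gA c := by
  induction k with
  | zero =>
    intro c dest hlen hscan
    rw [range_reverse_succ]
    simp only [List.range_zero, List.reverse_nil, List.foldl_cons, List.foldl_nil]
    simp only [bstep, gA]
    split_ifs with h1 h2 <;> simp [hscan]
  | succ k ih =>
    intro c dest hlen hscan
    rw [range_reverse_succ]
    simp only [List.foldl_cons]
    by_cases hO : c.getD (k + 1) "" = "O"
    · have hge := scan_ge c (k + 1 + 1)
      have hle := scan_le c (k + 1 + 1) (by omega)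
      have hd : k + 1 ≤ dest := by omega
      have hdl : dest < c.length := by omega
      have hb : bstep (c, dest) (k + 1) = ((c.set (k + 1) ".").set dest "O", dest - 1) := by
        rw [bstep_eq, if_pos hO]
      have hg : gA c (k + 1) = (c.set (k + 1) ".").set dest "O" := by
        rw [gA, if_pos hO, hscan]
        simp
      rw [hb, hg]
      have hlen2 : ((c.set (k + 1) ".").set dest "O").length = c.length := by simp
      have hscan2 : scan ((c.set (k + 1) ".").set dest "O") (k + 1) = dest - 1 + 1 := by
        have : scan ((c.set (k + 1) ".").set dest "O") (k + 1) = dest := by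
          apply scan_eq_of hd (by omega)
          · intro i hi1 hi2
            rw [getD_set]
            rw [if_neg (by rintro ⟨rfl, -⟩; omega)]
            rw [getD_set]
            rcases eq_or_ne (k + 1) i with rfl | hne
            · rw [if_pos ⟨rfl, by omega⟩]
            · rw [if_neg (by rintro ⟨rfl, -⟩; exact hne rfl)]
              exact scan_dots c (k + 1 + 1) i (by omega) (by omega)
          · rw [getD_set, if_pos ⟨rfl, by simpa using hdl⟩]
            simp
        omega
      exact ih _ _ (by omega) hscan2
    · by_cases hdot : c.getD (k + 1) "" = "."
      · have hb : bstep (c, dest) (k + 1) = (c, dest) := by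
          rw [bstep_eq, if_neg hO, if_neg (not_not_intro hdot)]
        have hg : gA c (k + 1) = c := by rw [gA, if_neg hO]
        rw [hb, hg]
        exact ih c dest (by omega) (by rw [scan_dot (by omega) hdot]; exact hscan)
      · have hb : bstep (c, dest) (k + 1) = (c, k) := by
          rw [bstep_eq, if_neg hO, if_pos hdot]
          simp
        have hg : gA c (k + 1) = c := by rw [gA, if_neg hO]
        rw [hb, hg]
        exact ih c k (by omega) (scan_block (by rintro ⟨-, h2⟩; exact hdot h2))

theorem slideCol_eq (c : List String) :
    slideColB c = (List.range (c.length - 1)).reverse.foldl gA c := by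
  rcases hn : c.length with _ | n
  · unfold slideColB
    rw [hn]
    simp
  · rcases n with _ | k
    · unfold slideColB
      rw [hn]
      simp only [range_reverse_succ, List.range_zero, List.reverse_nil, List.foldl_cons,
        List.foldl_nil, Nat.sub_self]
      rw [bstep_eq]
      split_ifs with h1 h2
      · rw [List.set_set]
        calc c.set 0 "O" = c.set 0 (c.getD 0 "") := by rw [h1]
          _ = c := set_getD_self c 0
      · rfl
      · rfl
    · unfold slideColB
      rw [hn]
      rw [range_reverse_succ]
      simp only [List.foldl_cons, Nat.add_sub_cancel]
      by_cases hO : c.getD (k + 1) "" = "O"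
      · have hb : bstep (c, k + 1) (k + 1) = (c, k) := by
          rw [bstep_eq, if_pos hO, List.set_set]
          have hc : c.set (k + 1) "O" = c := by
            calc c.set (k + 1) "O" = c.set (k + 1) (c.getD (k + 1) "") := by rw [hO]
              _ = c := set_getD_self c (k + 1)
          rw [hc]
          simp
        rw [hb]
        exact core_col k c k (by omega)
          (scan_block (by rintro ⟨-, h2⟩; rw [hO] at h2; simp at h2))
      · by_cases hdot : c.getD (k + 1) "" = "."
        · have hb : bstep (c, k + 1) (k + 1) = (c, k + 1) := by
            rw [bstep_eq, if_neg hO, if_neg (not_not_intro hdot)]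
          rw [hb]
          apply core_col k c (k + 1) (by omega)
          rw [scan_dot (by omega) hdot]
          exact scan_block (by rintro ⟨h1, -⟩; omega)
        · have hb : bstep (c, k + 1) (k + 1) = (c, k) := by
            rw [bstep_eq, if_neg hO, if_pos hdot]
            simp
          rw [hb]
          exact core_col k c k (by omega) (scan_block (by rintro ⟨-, h2⟩; exact hdot h2))

-- ---- grid → column reduction, A side ----
theorem whileA_eq (m : List (List String)) (j i0 : Nat) :
    whileA m j i0 = scan (colOf m j) i0 := by
  have key : ∀ n i0, m.length - i0 ≤ n → whileA m j i0 = scan (colOf m j) i0 := by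
    intro n
    induction n with
    | zero =>
      intro i0 hn
      rw [whileA, dif_neg (by rintro ⟨h1, -⟩; omega)]
      refine (scan_block ?_).symm
      rw [length_colOf]
      rintro ⟨h1, -⟩
      omega
    | succ n ih =>
      intro i0 hn
      by_cases h : i0 < m.length ∧ gcell m i0 j = "."
      · rw [whileA, dif_pos h, ih (i0 + 1) (by omega)]
        exact (scan_dot (by rw [length_colOf]; exact h.1)
          (by rw [getD_colOf]; exact h.2)).symm
      · rw [whileA, dif_neg h]
        refine (scan_block ?_).symm
        rintro ⟨h1, h2⟩
        exact h ⟨by rwa [length_colOf] at h1, by rwa [getD_colOf] at h2⟩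
  exact key (m.length - i0) i0 (Nat.le_refl _)

theorem rowlens_rowStepA (m : List (List String)) (i j : Nat) :
    (rowStepA m i j).map List.length = m.map List.length := by
  by_cases h : gcell m i j = "O"
  · rw [rowStepA, if_pos h, rowlens_gset, rowlens_gset]
  · rw [rowStepA, if_neg h]

theorem colOf_rowStepA_ne (m : List (List String)) (i j j' : Nat) (hne : j' ≠ j) :
    colOf (rowStepA m i j) j' = colOf m j' := by
  by_cases h : gcell m i j = "O"
  · rw [rowStepA, if_pos h, colOf_gset_ne _ _ _ _ _ hne, colOf_gset_ne _ _ _ _ _ hne]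
  · rw [rowStepA, if_neg h]

theorem colOf_rowStepA_self (m : List (List String)) (i j : Nat) (hw : WideP m j) :
    colOf (rowStepA m i j) j = gA (colOf m j) i := by
  by_cases h : gcell m i j = "O"
  · have hw2 := wide_of_rowlens (rowlens_gset m i j ".") hw
    rw [rowStepA, if_pos h, colOf_gset_self _ _ _ _ hw2, colOf_gset_self _ _ _ _ hw,
      gA, whileA_eq, if_pos (show (colOf m j).getD i "" = "O" by rw [getD_colOf]; exact h)]
  · rw [rowStepA, if_neg h, gA,
      if_neg (show ¬(colOf m j).getD i "" = "O" by rw [getD_colOf]; exact h)]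

theorem rowlens_foldRow (i : Nat) (L : List Nat) : ∀ m : List (List String),
    (L.foldl (fun acc j => rowStepA acc i j) m).map List.length = m.map List.length := by
  induction L with
  | nil => intro m; rfl
  | cons j0 L ih =>
    intro m
    rw [List.foldl_cons, ih, rowlens_rowStepA]

theorem colOf_foldRow_notmem (i j : Nat) (L : List Nat) (hj : j ∉ L) :
    ∀ m : List (List String), colOf (L.foldl (fun acc j' => rowStepA acc i j') m) j = colOf m j := by
  induction L with
  | nil => intro m; rfl
  | cons j0 L ih =>
    intro m
    rw [List.foldl_cons, ih (fun h => hj (List.mem_cons_of_mem _ h)),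
      colOf_rowStepA_ne _ _ _ _ (fun h => hj (by rw [h]; exact List.mem_cons_self))]

theorem colOf_foldRow_mem (i j : Nat) (L : List Nat) (hnd : L.Nodup) (hj : j ∈ L) :
    ∀ m : List (List String), (∀ j' ∈ L, WideP m j') →
    colOf (L.foldl (fun acc j' => rowStepA acc i j') m) j = gA (colOf m j) i := by
  induction L generalizing j with
  | nil => cases hj
  | cons j0 L ih =>
    intro m hwAll
    rw [List.foldl_cons]
    rcases List.mem_cons.1 hj with rfl | hjL
    · rw [colOf_foldRow_notmem _ _ _ (List.Nodup.notMem hnd),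
        colOf_rowStepA_self _ _ _ (hwAll _ List.mem_cons_self)]
    · rw [ih j (List.Nodup.of_cons hnd) hjL _
        (fun j2 h2 => wide_of_rowlens (rowlens_rowStepA m i j0) (hwAll j2 (List.mem_cons_of_mem _ h2))),
        colOf_rowStepA_ne]
      intro h
      subst h
      exact (List.Nodup.notMem hnd) hjL

theorem pre_of_rowlens {m m' : List (List String)}
    (h : m'.map List.length = m.map List.length) (hp : Pre_slideDown m) : Pre_slideDown m' := by
  intro r hr
  rw [ncols_congr h]
  have h1 : r.length ∈ m'.map List.length := List.mem_map_of_mem hr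
  rw [h] at h1
  rcases List.mem_map.1 h1 with ⟨r2, hr2, hl2⟩
  rw [← hl2]
  exact hp r2 hr2

theorem wideAll_of_pre {m : List (List String)} (hp : Pre_slideDown m) :
    ∀ j' ∈ List.range (ncols m), WideP m j' := by
  intro j2 hj2 r hr
  have := hp r hr
  have := List.mem_range.1 hj2
  omega

theorem rowlens_innerA (m : List (List String)) (i : Nat) :
    (innerA m i).map List.length = m.map List.length := by
  rw [innerA, rowlens_foldRow]

theorem colOf_innerA_lt {m : List (List String)} {i j : Nat} (hp : Pre_slideDown m)
    (hj : j < ncols m) : colOf (innerA m i) j = gA (colOf m j) i := by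
  rw [innerA]
  exact colOf_foldRow_mem i j _ (List.nodup_range) (List.mem_range.2 hj) m
    (fun j2 h2 => wideAll_of_pre hp j2 h2)

theorem colOf_innerA_ge {m : List (List String)} {i j : Nat} (hj : ¬ j < ncols m) :
    colOf (innerA m i) j = colOf m j := by
  rw [innerA]
  exact colOf_foldRow_notmem i j _ (fun h => hj (List.mem_range.1 h)) m

theorem rowlens_foldOuter (L : List Nat) : ∀ m : List (List String),
    (L.foldl innerA m).map List.length = m.map List.length := by
  induction L with
  | nil => intro m; rfl
  | cons i L ih =>
    intro m
    rw [List.foldl_cons, ih, rowlens_innerA]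

theorem colOf_foldOuter_lt (j : Nat) (L : List Nat) : ∀ m : List (List String),
    Pre_slideDown m → j < ncols m →
    colOf (L.foldl innerA m) j = L.foldl gA (colOf m j) := by
  induction L with
  | nil => intro m _ _; rfl
  | cons i L ih =>
    intro m hp hj
    rw [List.foldl_cons, List.foldl_cons,
      ih (innerA m i) (pre_of_rowlens (rowlens_innerA m i) hp)
        (by rwa [ncols_congr (rowlens_innerA m i)]),
      colOf_innerA_lt hp hj]

theorem colOf_foldOuter_ge (j : Nat) (L : List Nat) : ∀ m : List (List String),
    ¬ j < ncols m → colOf (L.foldl innerA m) j = colOf m j := by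
  induction L with
  | nil => intro m _; rfl
  | cons i L ih =>
    intro m hj
    rw [List.foldl_cons,
      ih (innerA m i) (by rwa [ncols_congr (rowlens_innerA m i)]),
      colOf_innerA_ge hj]

-- ---- grid → column reduction, B side ----
theorem colPassStep_eq (j : Nat) (m : List (List String)) (d i : Nat) :
    colPassStep j (m, d) i =
      if gcell m i j = "O" then (gset (gset m i j ".") d j "O", d - 1)
      else if gcell m i j ≠ "." then (m, i - 1) else (m, d) := rfl

theorem rowlens_colPassStep (j : Nat) (m : List (List String)) (d i : Nat) :
    ((colPassStep j (m, d) i).1).map List.length = m.map List.length := by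
  rw [colPassStep_eq]
  split_ifs with h1 h2
  · show (gset (gset m i j ".") d j "O").map List.length = m.map List.length
    rw [rowlens_gset, rowlens_gset]
  · rfl
  · rfl

theorem colOf_colPassStep_ne (j j' : Nat) (m : List (List String)) (d i : Nat)
    (hne : j' ≠ j) : colOf ((colPassStep j (m, d) i).1) j' = colOf m j' := by
  rw [colPassStep_eq]
  split_ifs with h1 h2
  · show colOf (gset (gset m i j ".") d j "O") j' = colOf m j'
    rw [colOf_gset_ne _ _ _ _ _ hne, colOf_gset_ne _ _ _ _ _ hne]
  · rfl
  · rfl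

theorem rowlens_colPassFold (j : Nat) (L : List Nat) : ∀ s : List (List String) × Nat,
    ((L.foldl (colPassStep j) s).1).map List.length = s.1.map List.length := by
  induction L with
  | nil => intro s; rfl
  | cons i L ih =>
    intro s
    rw [List.foldl_cons, ih, rowlens_colPassStep]

theorem colOf_colPassFold_ne (j j' : Nat) (hne : j' ≠ j) (L : List Nat) :
    ∀ s : List (List String) × Nat,
    colOf ((L.foldl (colPassStep j) s).1) j' = colOf s.1 j' := by
  induction L with
  | nil => intro s; rfl
  | cons i L ih =>
    intro s
    rw [List.foldl_cons, ih, colOf_colPassStep_ne _ _ _ _ _ hne]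

theorem colPass_sim (j : Nat) (L : List Nat) : ∀ (m : List (List String)) (dest : Nat),
    WideP m j →
    colOf ((L.foldl (colPassStep j) (m, dest)).1) j = (L.foldl bstep (colOf m j, dest)).1 ∧
    (L.foldl (colPassStep j) (m, dest)).2 = (L.foldl bstep (colOf m j, dest)).2 := by
  induction L with
  | nil => intro m dest hw; exact ⟨rfl, rfl⟩
  | cons i L ih =>
    intro m dest hw
    rw [List.foldl_cons, List.foldl_cons]
    by_cases hO : gcell m i j = "O"
    · have hc : colPassStep j (m, dest) i = (gset (gset m i j ".") dest j "O", dest - 1) := by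
        rw [colPassStep_eq, if_pos hO]
      have hb : bstep (colOf m j, dest) i = (((colOf m j).set i ".").set dest "O", dest - 1) := by
        rw [bstep_eq, if_pos (by rw [getD_colOf]; exact hO)]
      rw [hc, hb]
      have hw1 := wide_of_rowlens (rowlens_gset m i j ".") hw
      have hw2 := wide_of_rowlens (rowlens_gset (gset m i j ".") dest j "O") hw1
      have hcol : colOf (gset (gset m i j ".") dest j "O") j =
          ((colOf m j).set i ".").set dest "O" := by
        rw [colOf_gset_self _ _ _ _ hw1, colOf_gset_self _ _ _ _ hw]
      obtain ⟨h1, h2⟩ := ih (gset (gset m i j ".") dest j "O") (dest - 1) hw2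
      rw [hcol] at h1 h2
      exact ⟨h1, h2⟩
    · by_cases hdot : gcell m i j = "."
      · have hc : colPassStep j (m, dest) i = (m, dest) := by
          rw [colPassStep_eq, if_neg hO, if_neg (not_not_intro hdot)]
        have hb : bstep (colOf m j, dest) i = (colOf m j, dest) := by
          rw [bstep_eq, if_neg (by rw [getD_colOf]; exact hO),
            if_neg (not_not_intro (by rw [getD_colOf]; exact hdot))]
        rw [hc, hb]
        exact ih m dest hw
      · have hc : colPassStep j (m, dest) i = (m, i - 1) := by
          rw [colPassStep_eq, if_neg hO, if_pos hdot]
        have hb : bstep (colOf m j, dest) i = (colOf m j, i - 1) := by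
          rw [bstep_eq, if_neg (by rw [getD_colOf]; exact hO),
            if_pos (by rw [getD_colOf]; exact hdot)]
        rw [hc, hb]
        exact ih m (i - 1) hw

theorem rowlens_colPass (m : List (List String)) (j : Nat) :
    (colPass m j).map List.length = m.map List.length := by
  rw [colPass]
  exact rowlens_colPassFold j _ (m, m.length - 1)

theorem colOf_colPass_ne (m : List (List String)) (j j' : Nat) (hne : j' ≠ j) :
    colOf (colPass m j) j' = colOf m j' := by
  rw [colPass]
  exact colOf_colPassFold_ne j j' hne _ (m, m.length - 1)

theorem colOf_colPass_self (m : List (List String)) (j : Nat) (hw : WideP m j) :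
    colOf (colPass m j) j = slideColB (colOf m j) := by
  rw [colPass, slideColB, length_colOf]
  exact (colPass_sim j (List.range m.length).reverse m (m.length - 1) hw).1

theorem rowlens_foldB (L : List Nat) : ∀ m : List (List String),
    (L.foldl colPass m).map List.length = m.map List.length := by
  induction L with
  | nil => intro m; rfl
  | cons j0 L ih =>
    intro m
    rw [List.foldl_cons, ih, rowlens_colPass]

theorem colOf_foldB_notmem (j : Nat) (L : List Nat) (hj : j ∉ L) :
    ∀ m : List (List String), colOf (L.foldl colPass m) j = colOf m j := by
  induction L with
  | nil => intro m; rfl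
  | cons j0 L ih =>
    intro m
    rw [List.foldl_cons, ih (fun h => hj (List.mem_cons_of_mem _ h)),
      colOf_colPass_ne _ _ _ (fun h => hj (by rw [h]; exact List.mem_cons_self))]

theorem colOf_foldB_mem (j : Nat) (L : List Nat) (hnd : L.Nodup) (hj : j ∈ L) :
    ∀ m : List (List String), (∀ j' ∈ L, WideP m j') →
    colOf (L.foldl colPass m) j = slideColB (colOf m j) := by
  induction L generalizing j with
  | nil => cases hj
  | cons j0 L ih =>
    intro m hwAll
    rw [List.foldl_cons]
    rcases List.mem_cons.1 hj with rfl | hjL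
    · rw [colOf_foldB_notmem _ _ (List.Nodup.notMem hnd),
        colOf_colPass_self _ _ (hwAll _ List.mem_cons_self)]
    · rw [ih j (List.Nodup.of_cons hnd) hjL _
        (fun j2 h2 => wide_of_rowlens (rowlens_colPass m j0) (hwAll j2 (List.mem_cons_of_mem _ h2))),
        colOf_colPass_ne]
      intro h
      subst h
      exact (List.Nodup.notMem hnd) hjL

-- ---- extensionality and the main theorem ----
theorem grid_ext {m₁ m₂ : List (List String)}
    (hl : m₁.map List.length = m₂.map List.length)
    (hc : ∀ j, colOf m₁ j = colOf m₂ j) : m₁ = m₂ := by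
  have hlen : m₁.length = m₂.length := by
    have h0 := congrArg List.length hl
    simpa using h0
  apply List.ext_getElem hlen
  intro i h1 h2
  have h1m : i < (m₁.map List.length).length := by simpa using h1
  have h2m : i < (m₂.map List.length).length := by simpa using h2
  have hrl : m₁[i].length = m₂[i].length := by
    have h0 := congrArg (fun l => l.getD i 0) hl
    simp only [] at h0
    rw [List.getD_eq_getElem _ _ h1m, List.getD_eq_getElem _ _ h2m,
      List.getElem_map, List.getElem_map] at h0
    exact h0
  apply List.ext_getElem hrl
  intro j hj1 hj2
  have hcj : (colOf m₁ j).getD i "" = (colOf m₂ j).getD i "" := by rw [hc j]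
  rw [getD_colOf, getD_colOf, gcell, gcell, List.getD_eq_getElem _ _ h1,
    List.getD_eq_getElem _ _ h2, List.getD_eq_getElem _ _ hj1,
    List.getD_eq_getElem _ _ hj2] at hcj
  exact hcj

theorem main_eq (m : List (List String)) (hp : Pre_slideDown m) :
    slideDown m = slideDown_alt m := by
  apply grid_ext
  · rw [slideDown, slideDown_alt, rowlens_foldOuter, rowlens_foldB]
  · intro j
    by_cases hj : j < ncols m
    · have hA : colOf (slideDown m) j =
          (List.range (m.length - 1)).reverse.foldl gA (colOf m j) := by
        rw [slideDown]
        exact colOf_foldOuter_lt j _ m hp hj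
      have hB : colOf (slideDown_alt m) j = slideColB (colOf m j) := by
        rw [slideDown_alt]
        exact colOf_foldB_mem j _ List.nodup_range (List.mem_range.2 hj) m
          (wideAll_of_pre hp)
      rw [hA, hB, slideCol_eq, length_colOf]
    · have hA : colOf (slideDown m) j = colOf m j := by
        rw [slideDown]
        exact colOf_foldOuter_ge j _ m hj
      have hB : colOf (slideDown_alt m) j = colOf m j := by
        rw [slideDown_alt]
        exact colOf_foldB_notmem j _ (fun h => hj (List.mem_range.1 h)) m
      rw [hA, hB]

-- ===== VERDICT (by name: the statement is the Claim_ definition above) =====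
theorem slideDown_spec : Claim_equal_slideDown := by
  intro m _ hp
  unfold Spec_slideDown
  exact main_eq m hp
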